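-- pv_equiv track=rewrite | github.com/softwarefactory-project/zuulfmt | zuulfmt/__init__.py | reorder_items
-- ===== SOURCE A (Python) =====
-- from typing import List, Tuple
--
-- keys_order = (
--     "name",
--     "parent",
--     "description",
--     "run",
--     "pre-run",
--     "post-run",
--     "when",
--     "become",
--     "loop",
--     "register",
-- )
--
-- def reorder_items(prefix: str, items: List[str]) -> List[str]:
--     """Reorder a list of items according to keys_order
--
--     >>> reorder_items('  ', ['  run: test', '  name: n'])
--     ['  name: n', '  run: test']
--     """
--     ordered_pos = [
--         pos
--         for key in keys_order
--         for (pos, elem) in enumerate(items)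
--         if elem.startswith(prefix + key + ":")
--     ]
--     rest_pos = [pos for pos in range(len(items)) if pos not in ordered_pos]
--     return list(map(lambda pos: items[pos], ordered_pos + rest_pos))
-- ===== SOURCE B (Python) =====
-- keys_order = (
--     "name",
--     "parent",
--     "description",
--     "run",
--     "pre-run",
--     "post-run",
--     "when",
--     "become",
--     "loop",
--     "register",
-- )
--
-- def reorder_items(prefix, items):
--     def priority(item):
--         for i, key in enumerate(keys_order):
--             if item.startswith(prefix + key + ":"):
--                 return i
--         return len(keys_order)
--     return sorted(items, key=priority)
-- ===== Notes on version B (the rewrite author's own statement) =====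
-- stated objective: simpler
-- what changed: Replaces the per-key position scans plus membership-based rest computation with a single stable sort keyed by the index of the first matching key (falling back to len(keys_order)), relying on sort stability to preserve original order within each priority class.
import Mathlib
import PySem

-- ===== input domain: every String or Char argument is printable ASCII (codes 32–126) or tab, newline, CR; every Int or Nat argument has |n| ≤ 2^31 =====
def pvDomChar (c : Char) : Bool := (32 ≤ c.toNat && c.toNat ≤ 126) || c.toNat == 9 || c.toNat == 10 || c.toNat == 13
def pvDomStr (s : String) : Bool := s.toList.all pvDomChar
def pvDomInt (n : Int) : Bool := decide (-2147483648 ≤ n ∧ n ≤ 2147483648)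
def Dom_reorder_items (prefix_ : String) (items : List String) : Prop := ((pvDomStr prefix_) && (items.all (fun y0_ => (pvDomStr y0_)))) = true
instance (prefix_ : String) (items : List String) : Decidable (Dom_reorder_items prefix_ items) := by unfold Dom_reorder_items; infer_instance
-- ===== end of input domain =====

-- B replaces A's per-key position scans and membership-based rest computation by one stable
-- sort keyed by the index of the first matching key (objective: simpler).


-- ===== PORT A =====
-- the module constant keys_order (a tuple of strings)
def keysOrder : List String :=
  ["name", "parent", "description", "run", "pre-run", "post-run", "when", "become", "loop", "register"]

-- items[pos] is ported as pyGetD items pos "": every position produced by the two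
-- comprehensions lies in range, where pyGetD is exact Python indexing.
def reorder_items (prefix_ : String) (items : List String) : List String :=
  let ordered_pos : List Int := keysOrder.flatMap (fun key =>
    ((PySem.List.enumerate items 0).filter
      (fun pe => PySem.Str.startswith pe.2 (prefix_ ++ key ++ ":"))).map (fun pe => pe.1))
  let rest_pos : List Int :=
    (PySem.List.pyRange 0 (items.length : Int) 1).filter (fun pos => !(ordered_pos.contains pos))
  (ordered_pos ++ rest_pos).map (fun pos => PySem.List.pyGetD items pos "")

-- ===== PORT B =====
-- the inner 'for i, key in enumerate(keys_order): if …: return i / return len(keys_order)' loop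
def priorityGo (prefix_ item : String) : List (Int × String) → Int
  | [] => (keysOrder.length : Int)
  | (i, key) :: rest =>
      if PySem.Str.startswith item (prefix_ ++ key ++ ":") then i else priorityGo prefix_ item rest

def priority (prefix_ item : String) : Int :=
  priorityGo prefix_ item (PySem.List.enumerate keysOrder 0)

def reorder_items_alt (prefix_ : String) (items : List String) : List String :=
  PySem.List.sorted items (fun item => priority prefix_ item) false

-- ===== PRECONDITION & SPEC =====
def Spec_reorder_items (prefix_ : String) (items : List String) (out : List String) : Prop := out = reorder_items_alt prefix_ items
instance (prefix_ : String) (items : List String) (out : List String) : Decidable (Spec_reorder_items prefix_ items out) := by unfold Spec_reorder_items; infer_instance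

-- ===== CLAIM (what is proved, stated in full; the proofs are below) =====
def Claim_equal_reorder_items : Prop := ∀ (prefix_ : String) (items : List String), Dom_reorder_items prefix_ items → Spec_reorder_items prefix_ items (reorder_items prefix_ items)

-- ===== LEMMAS AND PROOFS =====

-- abbreviation used only by the proofs: "item matches key"
def mKey (prefix_ key item : String) : Bool := PySem.Str.startswith item (prefix_ ++ key ++ ":")

-- no "k:" is a prefix of a different "k':" among the keys of keys_order
lemma keys_prefix_free : (keysOrder.all (fun k => keysOrder.all (fun k' =>
    !((k.toList ++ [':']).isPrefixOf (k'.toList ++ [':'])) || k == k'))) = true := by decide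

-- at most one key of keys_order matches a given item: the two full prefixes are prefixes of
-- the same string, hence comparable, but no "k:" is a prefix of a different "k':"
lemma mKey_unique (prefix_ it k k' : String) (hk : k ∈ keysOrder) (hk' : k' ∈ keysOrder)
    (h1 : mKey prefix_ k it = true) (h2 : mKey prefix_ k' it = true) : k = k' := by
  have e1 : (prefix_.toList ++ (k.toList ++ [':'])) <+: it.toList := by
    have := h1
    simp only [mKey, PySem.Str.startswith, PySem.Chars.startswith] at this
    rw [List.isPrefixOf_iff_prefix] at this
    simpa using this
  have e2 : (prefix_.toList ++ (k'.toList ++ [':'])) <+: it.toList := by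
    have := h2
    simp only [mKey, PySem.Str.startswith, PySem.Chars.startswith] at this
    rw [List.isPrefixOf_iff_prefix] at this
    simpa using this
  have hcomp := List.prefix_or_prefix_of_prefix e1 e2
  rw [List.prefix_append_right_inj, List.prefix_append_right_inj] at hcomp
  have hall := keys_prefix_free
  rw [List.all_eq_true] at hall
  rcases hcomp with hc | hc
  · have := (List.all_eq_true.mp (hall k hk)) k' hk'
    rw [Bool.or_eq_true, Bool.not_eq_true', ← Bool.not_eq_true] at this
    rcases this with h | h
    · exact absurd (List.isPrefixOf_iff_prefix.mpr hc) h
    · exact eq_of_beq h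
  · have := (List.all_eq_true.mp (hall k' hk')) k hk
    rw [Bool.or_eq_true, Bool.not_eq_true', ← Bool.not_eq_true] at this
    rcases this with h | h
    · exact absurd (List.isPrefixOf_iff_prefix.mpr hc) h
    · exact (eq_of_beq h).symm

-- ==== generic facts about PySem.List.enumerate ====

lemma mem_enumerate_getElem {α : Type} (xs : List α) (s : Int) (pr : Int × α)
    (h : pr ∈ PySem.List.enumerate xs s) : ∃ t : Nat, pr.1 = s + t ∧ xs[t]? = some pr.2 := by
  induction xs generalizing s with
  | nil => simp [PySem.List.enumerate_nil] at h
  | cons x t ih =>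
    rw [PySem.List.enumerate_cons] at h
    rcases List.mem_cons.mp h with h | h
    · exact ⟨0, by simp [h]⟩
    · obtain ⟨u, hu, hg⟩ := ih (s + 1) h
      exact ⟨u + 1, by push_cast; omega, by simpa using hg⟩

lemma getElem_mem_enumerate {α : Type} (xs : List α) (s : Int) (t : Nat) (ht : t < xs.length) :
    ((s + t : Int), xs[t]) ∈ PySem.List.enumerate xs s := by
  induction xs generalizing s t with
  | nil => simp at ht
  | cons x l ih =>
    rw [PySem.List.enumerate_cons]
    cases t with
    | zero => simp
    | succ u =>
      refine List.mem_cons_of_mem _ ?_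
      have := ih (s + 1) u (by simpa using ht)
      simpa [add_assoc, add_comm, add_left_comm] using this

lemma mem_keys_of_mem_enumerate {α : Type} (xs : List α) (pr : Int × α)
    (h : pr ∈ PySem.List.enumerate xs 0) : pr.2 ∈ xs := by
  obtain ⟨t, _, hg⟩ := mem_enumerate_getElem xs 0 pr h
  exact List.mem_of_getElem? hg

lemma enumerate_filter_map_snd {α : Type} (xs : List α) (s : Int) (q : α → Bool) :
    ((PySem.List.enumerate xs s).filter (fun pe => q pe.2)).map (fun pe => pe.2) = xs.filter q := by
  induction xs generalizing s with
  | nil => simp [PySem.List.enumerate_nil]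
  | cons x t ih =>
    rw [PySem.List.enumerate_cons]
    by_cases hq : q x <;> simp [hq, ih]

-- the value at an enumerated position
lemma enumerate_pyGetD {α : Type} (xs : List α) (pr : Int × α) (d : α)
    (h : pr ∈ PySem.List.enumerate xs 0) : PySem.List.pyGetD xs pr.1 d = pr.2 := by
  obtain ⟨t, h1, h2⟩ := mem_enumerate_getElem xs 0 pr h
  have : pr.1 = (t : Int) := by omega
  rw [this, PySem.List.pyGetD_natCast]
  simp [List.getD, h2]

-- ==== the A side equals bucket concatenation ====

lemma ordered_key_map (items : List String) (q : String → Bool) :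
    (((PySem.List.enumerate items 0).filter (fun pe => q pe.2)).map (fun pe => pe.1)).map
      (fun pos => PySem.List.pyGetD items pos "") = items.filter q := by
  rw [List.map_map]
  have : ∀ pe ∈ (PySem.List.enumerate items 0).filter (fun pe => q pe.2),
      ((fun pos => PySem.List.pyGetD items pos "") ∘ (fun pe => pe.1)) pe = pe.2 := by
    intro pe hpe
    exact enumerate_pyGetD items pe "" (List.mem_filter.mp hpe).1
  rw [List.map_congr_left this]
  exact enumerate_filter_map_snd items 0 q

lemma reorder_items_eq_buckets (prefix_ : String) (items : List String) :
    reorder_items prefix_ items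
      = keysOrder.flatMap (fun k => items.filter (fun it => mKey prefix_ k it))
        ++ items.filter (fun it => !(keysOrder.any (fun k => mKey prefix_ k it))) := by
  unfold reorder_items
  simp only [List.map_append]
  congr 1
  · rw [List.map_flatMap]
    apply List.flatMap_congr
    intro k _
    exact ordered_key_map items (fun it => mKey prefix_ k it)
  · -- rest part
    have hcong : ∀ pos ∈ PySem.List.pyRange 0 (items.length : Int) 1,
        (!((keysOrder.flatMap (fun key =>
            ((PySem.List.enumerate items 0).filter
              (fun pe => PySem.Str.startswith pe.2 (prefix_ ++ key ++ ":"))).map (fun pe => pe.1))).contains pos))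
        = (!(keysOrder.any (fun k => mKey prefix_ k (PySem.List.pyGetD items pos "")))) := by
      intro pos hpos
      obtain ⟨h0, hlt⟩ := PySem.List.mem_pyRange_one.mp hpos
      congr 1
      rw [Bool.eq_iff_iff, List.contains_iff_mem, List.any_eq_true]
      constructor
      · rintro hmem
        obtain ⟨k, hk, hmem2⟩ := List.mem_flatMap.mp hmem
        obtain ⟨pe, hpe, hfst⟩ := List.mem_map.mp hmem2
        obtain ⟨hpe1, hpe2⟩ := List.mem_filter.mp hpe
        refine ⟨k, hk, ?_⟩
        have := enumerate_pyGetD items pe "" hpe1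
        rw [hfst] at this
        rw [this]
        exact hpe2
      · rintro ⟨k, hk, hm⟩
        apply List.mem_flatMap.mpr
        refine ⟨k, hk, ?_⟩
        apply List.mem_map.mpr
        have hmem : ((0 + (pos.toNat : Nat) : Int), items[pos.toNat]) ∈ PySem.List.enumerate items 0 :=
          getElem_mem_enumerate items 0 pos.toNat (by omega)
        refine ⟨((0 + (pos.toNat : Nat) : Int), items[pos.toNat]), ?_, by omega⟩
        apply List.mem_filter.mpr
        refine ⟨hmem, ?_⟩
        have hval : PySem.List.pyGetD items pos "" = items[pos.toNat] :=
          PySem.List.pyGetD_eq_getElem items "" h0 hlt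
        rw [hval] at hm
        exact hm
    rw [List.filter_congr hcong]
    have := List.filter_map (f := fun pos => PySem.List.pyGetD items pos "")
      (p := fun it => !(keysOrder.any (fun k => mKey prefix_ k it)))
      (l := PySem.List.pyRange 0 (items.length : Int) 1)
    rw [PySem.List.map_pyGetD_pyRange_zero'] at this
    simp only [Function.comp_def] at this
    rw [← this]

-- ==== stable insertion sort puts the items into priority buckets ====

lemma insertBy_append_left {α : Type} (before : α → α → Bool) (x : α) (l1 l2 : List α)
    (h : ∀ y ∈ l1, before x y = false) :
    PySem.List.insertBy before x (l1 ++ l2) = l1 ++ PySem.List.insertBy before x l2 := by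
  induction l1 with
  | nil => simp
  | cons y t ih =>
    have hy : before x y = false := h y (by simp)
    simp only [List.cons_append]
    rw [show PySem.List.insertBy before x (y :: (t ++ l2)) = if before x y then x :: y :: (t ++ l2) else y :: PySem.List.insertBy before x (t ++ l2) from rfl]
    simp [hy, ih (fun z hz => h z (by simp [hz]))]

lemma insertBy_all_lt {α : Type} (before : α → α → Bool) (x : α) (l : List α)
    (h : ∀ y ∈ l, before x y = true) : PySem.List.insertBy before x l = x :: l := by
  cases l with
  | nil => rfl
  | cons y t =>
    rw [show PySem.List.insertBy before x (y :: t) = if before x y then x :: y :: t else y :: PySem.List.insertBy before x t from rfl]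
    simp [h y (by simp)]

lemma sorted_snoc {α : Type} (key : α → Int) (xs : List α) (x : α) :
    PySem.List.sorted (xs ++ [x]) key false
      = PySem.List.insertBy (fun a b => decide (key a < key b)) x (PySem.List.sorted xs key false) := by
  simp [PySem.List.sorted, List.foldl_append]

lemma bucket_of_mem {α : Type} (key : α → Int) (xs : List α) (l : List Nat) (y : α)
    (hy : y ∈ l.flatMap (fun (i : Nat) => xs.filter (fun a => key a = (i : Int)))) :
    ∃ i ∈ l, key y = (i : Int) := by
  obtain ⟨i, hi, hmem⟩ := List.mem_flatMap.mp hy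
  exact ⟨i, hi, of_decide_eq_true (List.mem_filter.mp hmem).2⟩

lemma sorted_buckets {α : Type} (key : α → Int) (n : Nat) (xs : List α)
    (h : ∀ a ∈ xs, ∃ i : Nat, i < n ∧ key a = (i : Int)) :
    PySem.List.sorted xs key false
      = (List.range n).flatMap (fun (i : Nat) => xs.filter (fun a => key a = (i : Int))) := by
  induction xs using List.reverseRecOn with
  | nil => simp [PySem.List.sorted]
  | append_singleton xs x ih =>
    obtain ⟨k, hkn, hkx⟩ := h x (by simp)
    have hxs : ∀ a ∈ xs, ∃ i : Nat, i < n ∧ key a = (i : Int) := fun a ha => h a (by simp [ha])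
    rw [sorted_snoc, ih hxs]
    obtain ⟨m, hm⟩ : ∃ m, n = (k + 1) + m := ⟨n - (k + 1), by omega⟩
    subst hm
    rw [List.range_add, List.flatMap_append, List.flatMap_append]
    rw [insertBy_append_left]
    · rw [insertBy_all_lt]
      · have hx1 : (List.range (k + 1)).flatMap (fun (i : Nat) => (xs ++ [x]).filter (fun a => key a = (i : Int)))
            = ((List.range (k + 1)).flatMap (fun (i : Nat) => xs.filter (fun a => key a = (i : Int)))) ++ [x] := by
          rw [List.range_succ, List.flatMap_append, List.flatMap_append]
          have h1 : (List.range k).flatMap (fun (i : Nat) => (xs ++ [x]).filter (fun a => key a = (i : Int)))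
              = (List.range k).flatMap (fun (i : Nat) => xs.filter (fun a => key a = (i : Int))) := by
            rw [List.flatMap_def, List.flatMap_def]
            congr 1
            apply List.map_congr_left
            intro i hi
            have hne : ((key x = (i : Int))) = False := by
              simp only [eq_iff_iff, iff_false, hkx]
              have := List.mem_range.mp hi
              intro hc
              have : k = i := by exact_mod_cast hc
              omega
            simp [List.filter_append, hne]
          have h2 : ([k] : List Nat).flatMap (fun (i : Nat) => (xs ++ [x]).filter (fun a => key a = (i : Int)))
              = ([k] : List Nat).flatMap (fun (i : Nat) => xs.filter (fun a => key a = (i : Int))) ++ [x] := by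
            simp [List.filter_append, hkx]
          rw [h1, h2, List.append_assoc]
        have hx2 : (List.map (fun i => k + 1 + i) (List.range m)).flatMap (fun (i : Nat) => (xs ++ [x]).filter (fun a => key a = (i : Int)))
            = (List.map (fun i => k + 1 + i) (List.range m)).flatMap (fun (i : Nat) => xs.filter (fun a => key a = (i : Int))) := by
          rw [List.flatMap_def, List.flatMap_def]
          congr 1
          apply List.map_congr_left
          intro i hi
          obtain ⟨j, _, hj⟩ := List.mem_map.mp hi
          have hne : ((key x = (i : Int))) = False := by
            simp only [eq_iff_iff, iff_false, hkx]
            intro hc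
            have : k = i := by exact_mod_cast hc
            omega
          simp [List.filter_append, hne]
        rw [hx1, hx2, List.append_assoc]
        rfl
      · intro y hy
        obtain ⟨i, hi, hky⟩ := bucket_of_mem key xs _ y hy
        obtain ⟨j, _, hj⟩ := List.mem_map.mp hi
        simp only [decide_eq_true_eq, hkx, hky]
        subst hj
        push_cast
        omega
    · intro y hy
      obtain ⟨i, hi, hky⟩ := bucket_of_mem key xs _ y hy
      have := List.mem_range.mp hi
      simp only [decide_eq_false_iff_not, hkx, hky, not_lt]
      omega

-- ==== the priority function selects exactly the matching bucket ====

lemma priorityGo_cases (prefix_ it : String) (l : List (Int × String)) :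
    priorityGo prefix_ it l = (keysOrder.length : Int)
      ∨ ∃ k, (priorityGo prefix_ it l, k) ∈ l ∧ mKey prefix_ k it = true := by
  induction l with
  | nil => left; rfl
  | cons hd tl ih =>
    obtain ⟨j, k0⟩ := hd
    by_cases hm : PySem.Str.startswith it (prefix_ ++ k0 ++ ":")
    · right
      refine ⟨k0, ?_, hm⟩
      rw [show priorityGo prefix_ it ((j, k0) :: tl) = (if PySem.Str.startswith it (prefix_ ++ k0 ++ ":") then j else priorityGo prefix_ it tl) from rfl, if_pos hm]
      simp
    · have : priorityGo prefix_ it ((j, k0) :: tl) = priorityGo prefix_ it tl := by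
        rw [show priorityGo prefix_ it ((j, k0) :: tl) = (if PySem.Str.startswith it (prefix_ ++ k0 ++ ":") then j else priorityGo prefix_ it tl) from rfl, if_neg hm]
      rw [this]
      rcases ih with h | ⟨k, hk, hmk⟩
      · left; exact h
      · right; exact ⟨k, List.mem_cons_of_mem _ hk, hmk⟩

lemma priorityGo_eq (prefix_ it : String) (l : List (Int × String)) (i : Int) (k : String)
    (hik : (i, k) ∈ l) (hm : mKey prefix_ k it = true)
    (huniq : ∀ j k', (j, k') ∈ l → mKey prefix_ k' it = true → k' = k)
    (hinj : ∀ j, (j, k) ∈ l → j = i) :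
    priorityGo prefix_ it l = i := by
  induction l with
  | nil => simp at hik
  | cons hd tl ih =>
    obtain ⟨j0, k0⟩ := hd
    by_cases hm0 : PySem.Str.startswith it (prefix_ ++ k0 ++ ":")
    · have hk0 : k0 = k := huniq j0 k0 (by simp) hm0
      have hj0 : j0 = i := hinj j0 (by rw [← hk0] at *; simp)
      rw [show priorityGo prefix_ it ((j0, k0) :: tl) = (if PySem.Str.startswith it (prefix_ ++ k0 ++ ":") then j0 else priorityGo prefix_ it tl) from rfl, if_pos hm0, hj0]
    · have hstep : priorityGo prefix_ it ((j0, k0) :: tl) = priorityGo prefix_ it tl := by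
        rw [show priorityGo prefix_ it ((j0, k0) :: tl) = (if PySem.Str.startswith it (prefix_ ++ k0 ++ ":") then j0 else priorityGo prefix_ it tl) from rfl, if_neg hm0]
      rw [hstep]
      have hik' : (i, k) ∈ tl := by
        rcases List.mem_cons.mp hik with h | h
        · exfalso
          have : k0 = k := by injection h with _ h2; exact h2.symm
          rw [this] at hm0
          exact hm0 hm
        · exact h
      exact ih hik' (fun j k' hj hk' => huniq j k' (List.mem_cons_of_mem _ hj) hk')
        (fun j hj => hinj j (List.mem_cons_of_mem _ hj))

lemma priorityGo_fallback (prefix_ it : String) (l : List (Int × String))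
    (h : ∀ j k, (j, k) ∈ l → mKey prefix_ k it = false) :
    priorityGo prefix_ it l = (keysOrder.length : Int) := by
  induction l with
  | nil => rfl
  | cons hd tl ih =>
    obtain ⟨j0, k0⟩ := hd
    have hthis := h j0 k0 (by simp)
    simp only [mKey] at hthis
    rw [show priorityGo prefix_ it ((j0, k0) :: tl) = (if PySem.Str.startswith it (prefix_ ++ k0 ++ ":") then j0 else priorityGo prefix_ it tl) from rfl]
    rw [if_neg (by simp only [hthis]; exact Bool.false_ne_true)]
    exact ih (fun j k hj => h j k (List.mem_cons_of_mem _ hj))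

lemma priority_range (prefix_ it : String) : ∃ i : Nat, i < 11 ∧ priority prefix_ it = (i : Int) := by
  rcases priorityGo_cases prefix_ it (PySem.List.enumerate keysOrder 0) with h | ⟨k, hk, _⟩
  · exact ⟨10, by norm_num, by rw [priority, h]; rfl⟩
  · obtain ⟨t, h1, hg⟩ := mem_enumerate_getElem keysOrder 0 _ hk
    have ht : t < keysOrder.length := by
      by_contra hc
      rw [List.getElem?_eq_none (by omega)] at hg
      simp at hg
    have ht10 : t < 10 := by simpa [keysOrder] using ht
    dsimp only at h1
    have h1' : priorityGo prefix_ it (PySem.List.enumerate keysOrder 0) = 0 + (t : Int) := h1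
    exact ⟨t, by omega, by rw [priority, h1']; omega⟩

lemma priority_eq_of_match (prefix_ it : String) (i : Int) (k : String)
    (hik : (i, k) ∈ PySem.List.enumerate keysOrder 0) (hm : mKey prefix_ k it = true) :
    priority prefix_ it = i := by
  apply priorityGo_eq prefix_ it _ i k hik hm
  · intro j k' hj hk'
    exact mKey_unique prefix_ it k' k (mem_keys_of_mem_enumerate _ _ hj)
      (mem_keys_of_mem_enumerate _ _ hik) hk' hm
  · intro j hj
    obtain ⟨t, ht1, htg⟩ := mem_enumerate_getElem keysOrder 0 _ hj
    obtain ⟨u, hu1, hug⟩ := mem_enumerate_getElem keysOrder 0 _ hik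
    have hnd : keysOrder.Nodup := by decide
    have ht : t < keysOrder.length := by
      by_contra hc; rw [List.getElem?_eq_none (by omega)] at htg; simp at htg
    have hu : u < keysOrder.length := by
      by_contra hc; rw [List.getElem?_eq_none (by omega)] at hug; simp at hug
    dsimp only at ht1 hu1
    have : t = u := by
      apply List.Nodup.getElem_inj_iff hnd |>.mp
      · rw [List.getElem?_eq_getElem ht] at htg
        rw [List.getElem?_eq_getElem hu] at hug
        simp only [Option.some_inj] at htg hug
        rw [htg, hug]
    omega

lemma match_of_priority_eq (prefix_ it : String) (i : Int) (k : String)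
    (hik : (i, k) ∈ PySem.List.enumerate keysOrder 0) (hp : priority prefix_ it = i) :
    mKey prefix_ k it = true := by
  obtain ⟨u, hu1, hug⟩ := mem_enumerate_getElem keysOrder 0 _ hik
  rcases priorityGo_cases prefix_ it (PySem.List.enumerate keysOrder 0) with h | ⟨k', hk', hmk'⟩
  · exfalso
    rw [priority] at hp
    rw [hp] at h
    have hu : u < keysOrder.length := by
      by_contra hc; rw [List.getElem?_eq_none (by omega)] at hug; simp at hug
    dsimp only at hu1
    simp only [keysOrder, List.length] at hu h
    omega
  · rw [priority] at hp
    rw [hp] at hk'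
    obtain ⟨t, ht1, htg⟩ := mem_enumerate_getElem keysOrder 0 _ hk'
    dsimp only at ht1 hu1
    have : t = u := by omega
    subst this
    rw [htg] at hug
    injection hug with h
    dsimp only at h
    rw [← h]
    exact hmk'

lemma priority_eq_ten (prefix_ it : String) :
    (priority prefix_ it = 10) ↔ (keysOrder.any (fun k => mKey prefix_ k it) = false) := by
  constructor
  · intro hp
    by_contra hc
    rw [← Bool.not_eq_true, not_not, List.any_eq_true] at hc
    obtain ⟨k, hk, hm⟩ := hc
    obtain ⟨t, ht, hkt⟩ := List.mem_iff_getElem.mp hk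
    have hmem : ((0 + t : Int), keysOrder[t]) ∈ PySem.List.enumerate keysOrder 0 :=
      getElem_mem_enumerate keysOrder 0 t ht
    rw [hkt] at hmem
    have := priority_eq_of_match prefix_ it _ k hmem hm
    rw [hp] at this
    have : (10 : Int) = (0 + t : Int) := this
    simp only [keysOrder, List.length] at ht
    omega
  · intro h
    rw [priority, priorityGo_fallback]
    · rfl
    · intro j k hj
      have hkmem := mem_keys_of_mem_enumerate _ _ hj
      rw [List.any_eq_false] at h
      simpa using h k hkmem

-- ==== the B side equals the same bucket concatenation ====

lemma flatMap_range_length {α β : Type} (l : List α) (d : α) (f : α → List β) :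
    (List.range l.length).flatMap (fun (i : Nat) => f (l.getD i d)) = l.flatMap f := by
  induction l with
  | nil => simp
  | cons x t ih =>
    rw [List.length_cons, List.range_succ_eq_map, List.flatMap_cons, List.flatMap_map]
    simp only [List.getD_cons_zero, List.getD_cons_succ]
    rw [List.flatMap_cons, ih]

lemma bucket_matched (prefix_ : String) (items : List String) (i : Nat) (hi : i < 10) :
    items.filter (fun a => decide (priority prefix_ a = (i : Int)))
      = items.filter (fun it => mKey prefix_ (keysOrder.getD i "") it) := by
  have hlen : i < keysOrder.length := by simpa [keysOrder] using hi
  have hget : keysOrder.getD i "" = keysOrder[i] := List.getD_eq_getElem _ _ hlen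
  have hmem : ((0 + i : Int), keysOrder[i]) ∈ PySem.List.enumerate keysOrder 0 :=
    getElem_mem_enumerate keysOrder 0 i hlen
  apply List.filter_congr
  intro it _
  rw [Bool.eq_iff_iff, decide_eq_true_eq, hget]
  constructor
  · intro hp
    exact match_of_priority_eq prefix_ it _ _ hmem (by omega)
  · intro hm
    have := priority_eq_of_match prefix_ it _ _ hmem hm
    omega

lemma reorder_items_alt_eq_buckets (prefix_ : String) (items : List String) :
    reorder_items_alt prefix_ items
      = keysOrder.flatMap (fun k => items.filter (fun it => mKey prefix_ k it))
        ++ items.filter (fun it => !(keysOrder.any (fun k => mKey prefix_ k it))) := by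
  rw [reorder_items_alt,
    sorted_buckets (fun item => priority prefix_ item) 11 items (fun a _ => priority_range prefix_ a)]
  rw [show (11 : Nat) = 10 + 1 from rfl, List.range_succ, List.flatMap_append]
  congr 1
  · have hcong : ∀ i ∈ List.range 10,
        items.filter (fun a => decide (priority prefix_ a = (i : Int)))
          = items.filter (fun it => mKey prefix_ (keysOrder.getD i "") it) := by
      intro i hi
      exact bucket_matched prefix_ items i (List.mem_range.mp hi)
    rw [List.flatMap_congr hcong,
      show (10 : Nat) = keysOrder.length from rfl,
      flatMap_range_length keysOrder "" (fun k => items.filter (fun it => mKey prefix_ k it))]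
  · rw [List.flatMap_singleton]
    apply List.filter_congr
    intro it _
    rw [Bool.eq_iff_iff, decide_eq_true_eq]
    push_cast
    rw [priority_eq_ten prefix_ it]
    simp

-- ===== VERDICT (by name: the statement is the Claim_ definition above) =====
theorem reorder_items_spec : Claim_equal_reorder_items := by
  intro prefix_ items _
  unfold Spec_reorder_items
  rw [reorder_items_eq_buckets, reorder_items_alt_eq_buckets]
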